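-- pv_equiv track=rewrite | github.com/cclauss/pydrofoil | pydrofoil/optimize.py | bfs_edges
-- ===== SOURCE A (Python) =====
-- def bfs_edges(G, start=0):
--     from collections import deque
--     todo = deque([start])
--     seen = set()
--     res = []
--     while todo:
--         node = todo.popleft()
--         if node in seen:
--             continue
--         seen.add(node)
--         successors = G[node]
--         todo.extend(successors)
--         for succ in successors:
--             res.append((node, succ))
--     return res
-- ===== SOURCE B (Python) =====
-- def bfs_edges(G, start=0):
--     # Level-synchronous BFS: process the traversal one frontier at a time.
--     seen = set()
--     res = []
--     frontier = [start]
--     while frontier: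
--         next_frontier = []
--         for node in frontier:
--             if node in seen:
--                 continue
--             seen.add(node)
--             successors = G[node]
--             next_frontier.extend(successors)
--             for succ in successors:
--                 res.append((node, succ))
--         frontier = next_frontier
--     return res
-- ===== Notes on version B (the rewrite author's own statement) =====
-- stated objective: alternative
-- what changed: The single deque-driven loop is replaced by a level-synchronous BFS: an outer while over frontiers and an inner loop that builds the next frontier, with no queue at all; the per-node seen-check and duplicate successors keep the edge order identical.
import Mathlib
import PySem

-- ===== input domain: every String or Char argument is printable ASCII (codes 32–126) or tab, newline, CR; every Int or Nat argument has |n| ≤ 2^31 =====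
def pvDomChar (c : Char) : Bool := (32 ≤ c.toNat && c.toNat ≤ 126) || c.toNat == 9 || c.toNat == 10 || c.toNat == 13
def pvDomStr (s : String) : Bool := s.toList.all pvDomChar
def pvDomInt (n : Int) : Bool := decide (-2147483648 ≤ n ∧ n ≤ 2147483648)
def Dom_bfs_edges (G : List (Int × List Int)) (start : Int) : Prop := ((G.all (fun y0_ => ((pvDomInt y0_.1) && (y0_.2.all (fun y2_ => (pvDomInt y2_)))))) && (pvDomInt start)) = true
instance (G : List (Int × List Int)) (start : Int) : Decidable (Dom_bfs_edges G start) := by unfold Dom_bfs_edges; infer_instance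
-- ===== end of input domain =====

-- B replaces A's deque-driven loop by a level-synchronous BFS (an outer loop over frontiers); same asymptotic cost, identical edge list (proved below).

-- ===== PORT A =====
-- shared primitive: Python's G[node] dict lookup (none = KeyError, excluded by Pre_)
def pvGet (G : List (Int × List Int)) (node : Int) : Option (List Int) :=
  (PySem.Dict.mk G).get? node
def pvUnseen (G : List (Int × List Int)) (seen : PySem.Set Int) : Nat :=
  ((G.map Prod.fst).filter (fun k => !(PySem.Set.contains seen k))).length
theorem pvGet_mem_keys {G : List (Int × List Int)} {node : Int} {succ : List Int}
    (h : pvGet G node = some succ) : node ∈ G.map Prod.fst := by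
  have := PySem.Dict.get?_eq_none_iff_not_mem_keys (d := PySem.Dict.mk G) (k := node)
  by_contra hn
  simp [pvGet] at h
  rw [this.mpr (by simpa using hn)] at h
  simp at h
theorem pvUnseen_add_lt (G : List (Int × List Int)) (seen : PySem.Set Int) (node : Int)
    (hk : node ∈ G.map Prod.fst) (hs : PySem.Set.contains seen node = false) :
    pvUnseen G (PySem.Set.add seen node) < pvUnseen G seen := by
  unfold pvUnseen
  have hmem : node ∉ seen := by
    intro hm; rw [(PySem.Set.contains_iff seen node).mpr hm] at hs; exact Bool.noConfusion hs
  rw [PySem.Set.add_of_not_mem hmem]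
  have hc : ∀ k : Int, PySem.Set.contains (seen ++ [node]) k = (PySem.Set.contains seen k || k == node) := by
    intro k
    simp [PySem.Set.contains_eq_listContains, List.contains_eq_mem, beq_eq_decide]
  have hfe : (G.map Prod.fst).filter (fun k => !(PySem.Set.contains (seen ++ [node]) k))
      = ((G.map Prod.fst).filter (fun k => !(PySem.Set.contains seen k))).filter (fun k => !(k == node)) := by
    rw [List.filter_filter]
    apply List.filter_congr
    intro k _
    rw [hc k]
    simp [Bool.not_or, Bool.and_comm]
  rw [hfe]
  apply List.length_filter_lt_length_iff_exists.mpr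
  refine ⟨node, ?_, by simp⟩
  simp [List.mem_filter, hk]
  exact hmem
-- the 'while todo' loop of A ('none' from pvGet is the KeyError case, outside Pre_)
def bfsLoop (G : List (Int × List Int)) (todo : List Int) (seen : PySem.Set Int)
    (res : List (Int × Int)) : List (Int × Int) :=
  match todo with
  | [] => res
  | node :: rest =>
    if h1 : PySem.Set.contains seen node then bfsLoop G rest seen res
    else
      match h2 : pvGet G node with
      | none => res
      | some successors =>
          bfsLoop G (rest ++ successors) (PySem.Set.add seen node)
            (res ++ successors.map (fun succ => (node, succ)))
termination_by (pvUnseen G seen, todo.length)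
decreasing_by
  · exact Prod.Lex.right _ (Nat.lt_succ_self _)
  · exact Prod.Lex.left _ _
      (pvUnseen_add_lt G seen node (pvGet_mem_keys h2) (by simpa using h1))
def bfs_edges (G : List (Int × List Int)) (start : Int) : List (Int × Int) :=
  bfsLoop G [start] PySem.Set.empty []

-- ===== PORT B =====
-- one inner pass over a frontier: state (next_frontier, seen, res, err); err marks the KeyError case (outside Pre_)
def pvLevel (G : List (Int × List Int)) (frontier : List Int)
    (st : List Int × PySem.Set Int × List (Int × Int) × Bool) :
    List Int × PySem.Set Int × List (Int × Int) × Bool :=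
  frontier.foldl
    (fun st node =>
      match st with
      | (next, seen, res, err) =>
        if err then (next, seen, res, true)
        else if PySem.Set.contains seen node then (next, seen, res, false)
        else
          match pvGet G node with
          | none => (next, seen, res, true)
          | some successors =>
              (next ++ successors, PySem.Set.add seen node,
               res ++ successors.map (fun succ => (node, succ)), false))
    st

theorem pvLevel_err (G : List (Int × List Int)) :
    ∀ (f next : List Int) (seen : PySem.Set Int) (res : List (Int × Int)),
      pvLevel G f (next, seen, res, true) = (next, seen, res, true) := by
  intro f
  induction f with
  | nil => intro _ _ _; rfl
  | cons node f ih => intro next seen res; exact ih next seen res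

theorem pvLevel_measure (G : List (Int × List Int)) :
    ∀ (f next : List Int) (seen : PySem.Set Int) (res : List (Int × Int))
      (n' : List Int) (s' : PySem.Set Int) (r' : List (Int × Int)) (e' : Bool),
      pvLevel G f (next, seen, res, false) = (n', s', r', e') →
      pvUnseen G s' ≤ pvUnseen G seen ∧ (pvUnseen G s' = pvUnseen G seen → n' = next) := by
  intro f
  induction f with
  | nil =>
    intro next seen res n' s' r' e' h
    cases h
    exact ⟨le_refl _, fun _ => rfl⟩
  | cons node f ih =>
    intro next seen res n' s' r' e' h
    by_cases hc : PySem.Set.contains seen node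
    · have hm : node ∈ seen := (PySem.Set.contains_iff _ _).mp hc
      have : pvLevel G (node :: f) (next, seen, res, false) = pvLevel G f (next, seen, res, false) := by
        simp [pvLevel, List.foldl_cons, hm]
      rw [this] at h
      exact ih next seen res n' s' r' e' h
    · have hnm : node ∉ seen := fun hm => hc ((PySem.Set.contains_iff _ _).mpr hm)
      cases hg : pvGet G node with
      | none =>
        have : pvLevel G (node :: f) (next, seen, res, false)
            = pvLevel G f (next, seen, res, true) := by
          simp [pvLevel, List.foldl_cons, hnm, hg]
        rw [this, pvLevel_err] at h
        cases h
        exact ⟨le_refl _, fun _ => rfl⟩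
      | some succ =>
        have : pvLevel G (node :: f) (next, seen, res, false)
            = pvLevel G f (next ++ succ, PySem.Set.add seen node,
                res ++ succ.map (fun s => (node, s)), false) := by
          simp [pvLevel, List.foldl_cons, hnm, hg]
        rw [this] at h
        have hlt := pvUnseen_add_lt G seen node (pvGet_mem_keys hg) (by simpa using hc)
        have := (ih _ _ _ n' s' r' e' h).1
        constructor
        · omega
        · intro he; omega


-- the 'while frontier' loop of B
def bfsLevels (G : List (Int × List Int)) (frontier : List Int) (seen : PySem.Set Int)
    (res : List (Int × Int)) : List (Int × Int) :=
  match frontier with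
  | [] => res
  | _ :: _ =>
    match h : pvLevel G frontier ([], seen, res, false) with
    | (_, _, r, true) => r
    | (next, s, r, false) => bfsLevels G next s r
termination_by (pvUnseen G seen, frontier.length)
decreasing_by
  rcases pvLevel_measure G frontier [] seen res next s r false h with ⟨hle, heq⟩
  rcases Nat.lt_or_eq_of_le hle with hlt | hE
  · exact Prod.Lex.left _ _ hlt
  · have : next = [] := heq hE
    subst this
    exact hE ▸ Prod.Lex.right _ (by simp)


def bfs_edges_alt (G : List (Int × List Int)) (start : Int) : List (Int × Int) :=
  bfsLevels G [start] PySem.Set.empty []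

-- ===== PRECONDITION & SPEC =====
-- successor list of a node (empty for a non-key), and the set of nodes reachable from start,
-- computed as a plain monotone fixpoint iteration of one-step expansion (neither port's algorithm:
-- no queue, no frontier, no edge list; iterating |{start} ∪ all successors| times reaches the fixpoint)
def pvSuccs (G : List (Int × List Int)) (n : Int) : List Int := (pvGet G n).getD []
def pvExpand (G : List (Int × List Int)) (S : PySem.Set Int) : PySem.Set Int :=
  PySem.Set.update S (S.flatMap (pvSuccs G))
def pvClosure (G : List (Int × List Int)) (start : Int) : PySem.Set Int :=
  (pvExpand G)^[(start :: G.flatMap (fun p => p.2)).length] (PySem.Set.add PySem.Set.empty start)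
-- Pre_ is exactly A's domain: every node reachable from start is a key of G (else A raises KeyError)
def Pre_bfs_edges (G : List (Int × List Int)) (start : Int) : Prop :=
  ∀ n ∈ pvClosure G start, (pvGet G n).isSome = true
instance (G : List (Int × List Int)) (start : Int) : Decidable (Pre_bfs_edges G start) := by
  unfold Pre_bfs_edges; infer_instance
def pvWitness_bfs_edges : (List (Int × List Int)) × Int := ([(0, [1]), (1, [0, 1])], 0)

def Spec_bfs_edges (G : List (Int × List Int)) (start : Int) (out : List (Int × Int)) : Prop := out = bfs_edges_alt G start
instance (G : List (Int × List Int)) (start : Int) (out : List (Int × Int)) : Decidable (Spec_bfs_edges G start out) := by unfold Spec_bfs_edges; infer_instance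

-- ===== CLAIM (what is proved, stated in full; the proofs are below) =====
def Claim_equal_bfs_edges : Prop := ∀ (G : List (Int × List Int)) (start : Int), Dom_bfs_edges G start → Pre_bfs_edges G start → Spec_bfs_edges G start (bfs_edges G start)

-- ===== LEMMAS AND PROOFS =====
theorem bfsLoop_nil (G : List (Int × List Int)) (seen : PySem.Set Int) (res : List (Int × Int)) :
    bfsLoop G [] seen res = res := by rw [bfsLoop]

theorem bfsLoop_cons_seen {G : List (Int × List Int)} {node : Int} {rest : List Int}
    {seen : PySem.Set Int} {res : List (Int × Int)} (h : node ∈ seen) :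
    bfsLoop G (node :: rest) seen res = bfsLoop G rest seen res := by
  rw [bfsLoop, dif_pos ((PySem.Set.contains_iff _ _).mpr h)]

theorem bfsLoop_cons_none {G : List (Int × List Int)} {node : Int} {rest : List Int}
    {seen : PySem.Set Int} {res : List (Int × Int)} (h : node ∉ seen) (hg : pvGet G node = none) :
    bfsLoop G (node :: rest) seen res = res := by
  rw [bfsLoop, dif_neg (fun hc => h ((PySem.Set.contains_iff _ _).mp hc))]
  split
  · rfl
  · next s2 heq => rw [hg] at heq; simp at heq

theorem bfsLoop_cons_some {G : List (Int × List Int)} {node : Int} {rest succ : List Int}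
    {seen : PySem.Set Int} {res : List (Int × Int)} (h : node ∉ seen) (hg : pvGet G node = some succ) :
    bfsLoop G (node :: rest) seen res
      = bfsLoop G (rest ++ succ) (PySem.Set.add seen node)
          (res ++ succ.map (fun s => (node, s))) := by
  rw [bfsLoop, dif_neg (fun hc => h ((PySem.Set.contains_iff _ _).mp hc))]
  split
  · next heq => rw [hg] at heq; simp at heq
  · next s2 heq =>
      rw [hg] at heq
      cases heq
      rfl

theorem bfsLoop_level (G : List (Int × List Int)) (q : List Int) :
    ∀ (f next : List Int) (seen : PySem.Set Int) (res : List (Int × Int)),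
      bfsLoop G (f ++ (q ++ next)) seen res =
        match pvLevel G f (next, seen, res, false) with
        | (_, _, r', true) => r'
        | (n', s', r', false) => bfsLoop G (q ++ n') s' r' := by
  intro f
  induction f with
  | nil => intro next seen res; rfl
  | cons node f ih =>
    intro next seen res
    by_cases hm : node ∈ seen
    · have hstep : pvLevel G (node :: f) (next, seen, res, false)
          = pvLevel G f (next, seen, res, false) := by
        simp [pvLevel, List.foldl_cons, hm]
      rw [hstep, List.cons_append, bfsLoop_cons_seen hm]
      exact ih next seen res
    · cases hg : pvGet G node with
      | none =>
        have hstep : pvLevel G (node :: f) (next, seen, res, false)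
            = pvLevel G f (next, seen, res, true) := by
          simp [pvLevel, List.foldl_cons, hm, hg]
        rw [hstep, pvLevel_err, List.cons_append, bfsLoop_cons_none hm hg]
      | some succ =>
        have hstep : pvLevel G (node :: f) (next, seen, res, false)
            = pvLevel G f (next ++ succ, PySem.Set.add seen node,
                res ++ succ.map (fun s => (node, s)), false) := by
          simp [pvLevel, List.foldl_cons, hm, hg]
        rw [hstep, List.cons_append, bfsLoop_cons_some hm hg]
        have : (f ++ (q ++ next)) ++ succ = f ++ (q ++ (next ++ succ)) := by
          simp [List.append_assoc]
        rw [this]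
        exact ih (next ++ succ) (PySem.Set.add seen node) (res ++ succ.map (fun s => (node, s)))

theorem bfs_agree (G : List (Int × List Int)) (f : List Int) (seen : PySem.Set Int)
    (res : List (Int × Int)) : bfsLoop G f seen res = bfsLevels G f seen res := by
  match f with
  | [] => rw [bfsLoop_nil, bfsLevels]
  | node :: rest =>
    have hL := bfsLoop_level G [] (node :: rest) [] seen res
    simp only [List.append_nil] at hL
    rw [hL, bfsLevels]
    rcases h : pvLevel G (node :: rest) ([], seen, res, false) with ⟨n', s', r', e'⟩
    cases e' with
    | true => rfl
    | false =>
      simp only [List.nil_append]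
      exact bfs_agree G n' s' r'
termination_by (pvUnseen G seen, f.length)
decreasing_by
  rcases pvLevel_measure G (node :: rest) [] seen res n' s' r' false h with ⟨hle, heq⟩
  rcases Nat.lt_or_eq_of_le hle with hlt | hE
  · exact Prod.Lex.left _ _ hlt
  · have : n' = [] := heq hE
    subst this
    exact hE ▸ Prod.Lex.right _ (by simp)

-- ===== VERDICT (by name: the statement is the Claim_ definition above) =====
theorem bfs_edges_spec : Claim_equal_bfs_edges := by
  intro G start _ _
  unfold Spec_bfs_edges bfs_edges bfs_edges_alt
  exact bfs_agree G [start] PySem.Set.empty []
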